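-- pv_equiv track=rewrite | github.com/AutomatedProcessImprovement/optimos_v2 | o2/util/bit_mask_helper.py | get_ranges_from_bitmask
-- ===== SOURCE A (Python) =====
-- def bitmask_to_string(bitmask: int, padLeft=24) -> str:
--     """Convert a bitmask to a string of 1s and 0s.
--
--     Pads the left side with 0s to the specified length.
--     """
--     return bin(bitmask)[2:].zfill(padLeft)
--
-- def get_ranges_from_bitmask(bitmask: int) -> list[tuple[int, int]]:
--     """Get the ranges of 1s in a bitmask."""
--     bitmask_str = bitmask_to_string(bitmask)
--     ranges: list[tuple[int, int]] = []
--     start = None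
--     for i in range(len(bitmask_str)):
--         if bitmask_str[i] == "1" and start is None:
--             start = i
--         elif bitmask_str[i] == "0" and start is not None:
--             ranges.append((start, i))
--             start = None
--     if start is not None:
--         ranges.append((start, len(bitmask_str)))
--     return ranges
-- ===== SOURCE B (Python) =====
-- def bitmask_to_string(bitmask: int, padLeft=24) -> str:
--     """Convert a bitmask to a string of 1s and 0s.
--
--     Pads the left side with 0s to the specified length.
--     """
--     return bin(bitmask)[2:].zfill(padLeft)
--
-- def get_ranges_from_bitmask(bitmask: int) -> list[tuple[int, int]]:
--     """Ranges of 1s via boundary detection on the list of 1-positions: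
--     a position starts a range iff its predecessor position is not adjacent,
--     and ends one iff its successor position is not adjacent."""
--     s = bitmask_to_string(bitmask)
--     ones = [i for i, c in enumerate(s) if c == "1"]
--     starts = [p for j, p in enumerate(ones) if j == 0 or ones[j - 1] != p - 1]
--     ends = [p + 1 for j, p in enumerate(ones) if j == len(ones) - 1 or ones[j + 1] != p + 1]
--     return list(zip(starts, ends))
-- ===== Notes on version B (the rewrite author's own statement) =====
-- stated objective: alternative
-- what changed: B first collects the list of 1-positions, then finds range boundaries by comparing neighbouring positions (a start where the predecessor is not adjacent, an end where the successor is not adjacent) and zips starts with ends, instead of A's single character-by-character state machine with a carried start and post-loop flush.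
import Mathlib
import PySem

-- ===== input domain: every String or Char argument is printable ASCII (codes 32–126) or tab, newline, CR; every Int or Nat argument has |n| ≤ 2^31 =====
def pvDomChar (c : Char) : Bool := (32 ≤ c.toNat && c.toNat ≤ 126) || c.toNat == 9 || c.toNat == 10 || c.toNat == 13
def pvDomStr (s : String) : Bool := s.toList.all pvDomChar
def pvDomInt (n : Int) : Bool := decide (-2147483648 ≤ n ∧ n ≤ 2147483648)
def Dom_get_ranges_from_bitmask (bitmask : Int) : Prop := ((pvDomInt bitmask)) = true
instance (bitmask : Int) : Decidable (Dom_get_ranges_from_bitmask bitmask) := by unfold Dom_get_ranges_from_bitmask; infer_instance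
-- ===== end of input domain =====

-- B replaces A's character state machine by boundary detection over the list of 1-positions; same O(n) cost, no speed claim.

-- ===== PORT A =====
-- hand-port of Python's bin(n): binary digits of n (MSB first), n > 0 case
def pvBinDigits (n : Nat) : List Char :=
  if h : n = 0 then []
  else pvBinDigits (n / 2) ++ [if n % 2 = 1 then '1' else '0']
decreasing_by exact Nat.div_lt_self (Nat.pos_of_ne_zero h) (by decide)

-- bin(bitmask)[2:] : for negative n this is 'b' followed by the digits of |n| (exact: Python's bin)
def pvBinTail (n : Int) : List Char :=
  if n < 0 then 'b' :: pvBinDigits (-n).toNat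
  else if n = 0 then ['0']
  else pvBinDigits n.toNat

-- .zfill(24): pad with '0' on the left to length 24 (no sign char occurs here; exact on this input)
def bitmask_to_string (bitmask : Int) : List Char :=
  List.replicate (24 - (pvBinTail bitmask).length) '0' ++ pvBinTail bitmask

-- A's for-loop: index i, carried start : Option Int, accumulated ranges
def aLoop (cs : List Char) (i : Int) (start : Option Int) (ranges : List (Int × Int)) :
    List (Int × Int) × Option Int :=
  match cs, start with
  | [], st => (ranges, st)
  | c :: rest, none =>
      if c = '1' then aLoop rest (i + 1) (some i) ranges
      else aLoop rest (i + 1) none ranges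
  | c :: rest, some s =>
      if c = '0' then aLoop rest (i + 1) none (ranges ++ [(s, i)])
      else aLoop rest (i + 1) (some s) ranges

def get_ranges_from_bitmask (bitmask : Int) : List (Int × Int) :=
  let cs := bitmask_to_string bitmask
  match aLoop cs 0 none [] with
  | (ranges, some s) => ranges ++ [(s, (cs.length : Int))]
  | (ranges, none) => ranges

-- ===== PORT B =====
-- [i for i, c in enumerate(s) if c == "1"]
def onesB (cs : List Char) (i : Int) : List Int :=
  match cs with
  | [] => []
  | c :: rest => if c = '1' then i :: onesB rest (i + 1) else onesB rest (i + 1)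

-- [p for j, p in enumerate(ones) if j == 0 or ones[j-1] != p - 1]
-- (adjacent comparison: element kept iff first, or the previous position is not p - 1)
def startsAux (prev : Int) (l : List Int) : List Int :=
  match l with
  | [] => []
  | p :: rest => if prev ≠ p - 1 then p :: startsAux p rest else startsAux p rest

def startsB (l : List Int) : List Int :=
  match l with
  | [] => []
  | p :: rest => p :: startsAux p rest

-- [p + 1 for j, p in enumerate(ones) if j == len(ones)-1 or ones[j+1] != p + 1]
def endsB (l : List Int) : List Int :=
  match l with
  | [] => []
  | [p] => [p + 1]
  | p :: q :: rest => if q ≠ p + 1 then (p + 1) :: endsB (q :: rest) else endsB (q :: rest)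

def get_ranges_from_bitmask_alt (bitmask : Int) : List (Int × Int) :=
  let ones := onesB (bitmask_to_string bitmask) 0
  List.zip (startsB ones) (endsB ones)

-- ===== PRECONDITION & SPEC =====
def Spec_get_ranges_from_bitmask (bitmask : Int) (out : List (Int × Int)) : Prop := out = get_ranges_from_bitmask_alt bitmask
instance (bitmask : Int) (out : List (Int × Int)) : Decidable (Spec_get_ranges_from_bitmask bitmask out) := by unfold Spec_get_ranges_from_bitmask; infer_instance

-- ===== CLAIM (what is proved, stated in full; the proofs are below) =====
def Claim_equal_get_ranges_from_bitmask : Prop := ∀ (bitmask : Int), Dom_get_ranges_from_bitmask bitmask → Spec_get_ranges_from_bitmask bitmask (get_ranges_from_bitmask bitmask)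

-- ===== LEMMAS AND PROOFS =====

-- proof-internal intermediate: maximal-run scan both ports are reduced to
def splitRun (cs : List Char) : Nat × List Char :=
  match cs with
  | [] => (0, [])
  | c :: rest => if c = '1' then
      let (n, r) := splitRun rest
      (n + 1, r)
    else (0, c :: rest)

theorem splitRun_len_le (cs : List Char) : (splitRun cs).2.length ≤ cs.length := by
  induction cs with
  | nil => simp [splitRun]
  | cons c rest ih =>
    simp only [splitRun]
    split
    · cases h : splitRun rest with
      | mk n r => simp [h] at ih ⊢; omega
    · simp

def bRuns (cs : List Char) (i : Int) : List (Int × Int) :=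
  match cs with
  | [] => []
  | c :: rest =>
      if c = '1' then
        (i, i + 1 + ((splitRun rest).1 : Int)) ::
          bRuns (splitRun rest).2 (i + 1 + ((splitRun rest).1 : Int))
      else bRuns rest (i + 1)
termination_by cs.length
decreasing_by
  · have := splitRun_len_le rest
    simp
    omega
  · simp

-- the final value of A's loop with the post-loop flush, against the run scan, for either start state
theorem aLoop_eq (cs : List Char) (hcs : ∀ c ∈ cs, c = '0' ∨ c = '1') :
    ∀ (i : Int) (start : Option Int) (ranges : List (Int × Int)),
    (match aLoop cs i start ranges with
     | (r, some s) => r ++ [(s, i + (cs.length : Int))]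
     | (r, none) => r)
    = ranges ++ (match start with
       | none => bRuns cs i
       | some s =>
           (s, i + ((splitRun cs).1 : Int)) :: bRuns (splitRun cs).2 (i + ((splitRun cs).1 : Int))) := by
  induction cs with
  | nil =>
    intro i start ranges
    cases start <;> simp [aLoop, bRuns, splitRun]
  | cons c rest ih0 =>
    have ih := ih0 (fun c hc => hcs c (by simp [hc]))
    intro i start ranges
    have hend : i + (((c :: rest).length : Nat) : Int) = (i + 1) + ((rest.length : Nat) : Int) := by
      simp only [List.length_cons]; push_cast; ring
    cases start with
    | none =>
      by_cases hc : c = '1'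
      · subst hc
        simp only [aLoop, reduceIte, hend]
        rw [ih (i + 1) (some (i)) ranges]
        simp only [bRuns, reduceIte]
      · simp only [aLoop, if_neg hc, hend]
        rw [ih (i + 1) none ranges]
        simp only [bRuns, if_neg hc]
    | some s =>
      by_cases hc : c = '0'
      · subst hc
        have hne : ('0' : Char) ≠ '1' := by decide
        simp only [aLoop, reduceIte, hend]
        rw [ih (i + 1) none (ranges ++ [(s, i)])]
        simp only [splitRun]
        simp [bRuns]
      · by_cases h1 : c = '1'
        · subst h1
          have hne : ('1' : Char) ≠ '0' := by decide
          simp only [aLoop, hend]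
          rw [if_neg hne]
          rw [ih (i + 1) (some s) ranges]
          simp only [splitRun, reduceIte]
          have harith : i + (((splitRun rest).1 + 1 : Nat) : Int)
              = (i + 1) + (((splitRun rest).1 : Nat) : Int) := by push_cast; ring
          rw [harith]
        · exact absurd (hcs c (by simp)) (by simp [hc, h1])

theorem binDigits_mem (n : Nat) : ∀ c ∈ pvBinDigits n, c = '0' ∨ c = '1' := by
  induction n using Nat.strong_induction_on with
  | _ n ih =>
    rw [pvBinDigits]
    split
    · simp
    · intro c hc
      rcases List.mem_append.mp hc with h | h
      · exact ih (n / 2) (Nat.div_lt_self (Nat.pos_of_ne_zero (by assumption)) (by decide)) c h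
      · simp at h; subst h; split <;> simp

theorem aLoop_skip (p : List Char) : ∀ (q : List Char) (i : Int) (rs : List (Int × Int)),
    (∀ c ∈ p, c ≠ '1') → aLoop (p ++ q) i none rs = aLoop q (i + (p.length : Int)) none rs := by
  induction p with
  | nil => intro q i rs _; simp
  | cons c rest ih =>
    intro q i rs hp
    have hc : c ≠ '1' := hp c (by simp)
    have hl : i + (((c :: rest).length : Nat) : Int) = (i + 1) + ((rest.length : Nat) : Int) := by
      simp only [List.length_cons]; push_cast; ring
    rw [hl]
    simp only [List.cons_append, aLoop, if_neg hc]
    exact ih q (i + 1) rs (fun c hc => hp c (by simp [hc]))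

theorem bRuns_skip (p : List Char) : ∀ (q : List Char) (i : Int),
    (∀ c ∈ p, c ≠ '1') → bRuns (p ++ q) i = bRuns q (i + (p.length : Int)) := by
  induction p with
  | nil => intro q i _; simp
  | cons c rest ih =>
    intro q i hp
    have hc : c ≠ '1' := hp c (by simp)
    have hl : i + (((c :: rest).length : Nat) : Int) = (i + 1) + ((rest.length : Nat) : Int) := by
      simp only [List.length_cons]; push_cast; ring
    rw [hl]
    simp only [List.cons_append, bRuns, if_neg hc]
    exact ih q (i + 1) (fun c hc => hp c (by simp [hc]))

-- A equals bRuns on a non-'1' prefix p followed by an all-binary block q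
theorem a_eq_bRuns (p q : List Char) (hp : ∀ c ∈ p, c ≠ '1') (hq : ∀ c ∈ q, c = '0' ∨ c = '1') :
    (match aLoop (p ++ q) 0 none [] with
     | (r, some s) => r ++ [(s, ((p ++ q).length : Int))]
     | (r, none) => r) = bRuns (p ++ q) 0 := by
  rw [aLoop_skip p q 0 [] hp, bRuns_skip p q 0 hp]
  have := aLoop_eq q hq ((0 : Int) + (p.length : Int)) none []
  simp only [List.nil_append] at this
  have hlen : (0 : Int) + (p.length : Int) + (q.length : Int) = (((p ++ q).length : Nat) : Int) := by
    simp only [List.length_append]; push_cast; ring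
  rw [hlen] at this
  exact this

theorem bitmask_split (bitmask : Int) : ∃ p q, bitmask_to_string bitmask = p ++ q ∧
    (∀ c ∈ p, c ≠ '1') ∧ (∀ c ∈ q, c = '0' ∨ c = '1') := by
  unfold bitmask_to_string pvBinTail
  split
  · refine ⟨List.replicate (24 - ('b' :: pvBinDigits (-bitmask).toNat).length) '0' ++ ['b'],
      pvBinDigits (-bitmask).toNat, by simp, ?_, binDigits_mem _⟩
    intro c hc
    rcases List.mem_append.mp hc with h | h
    · rw [List.eq_of_mem_replicate h]; decide
    · simp at h; subst h; decide
  · split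
    · exact ⟨List.replicate (24 - 1) '0', ['0'], by simp, fun c hc => by
        rw [List.eq_of_mem_replicate hc]; decide, by simp⟩
    · exact ⟨List.replicate (24 - (pvBinDigits bitmask.toNat).length) '0', pvBinDigits bitmask.toNat,
        rfl, fun c hc => by rw [List.eq_of_mem_replicate hc]; decide, binDigits_mem _⟩

-- ===== B-side lemmas: zip(starts, ends)(ones) equals bRuns =====

-- consecutive run of positions starting at j
def runFrom (j : Int) : Nat → List Int
  | 0 => []
  | n + 1 => j :: runFrom (j + 1) n

theorem splitRun_decomp (cs : List Char) :
    cs = List.replicate (splitRun cs).1 '1' ++ (splitRun cs).2 ∧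
    (∀ c ∈ (splitRun cs).2.head?, c ≠ '1') := by
  induction cs with
  | nil => simp [splitRun]
  | cons c rest ih =>
    simp only [splitRun]
    by_cases hc : c = '1'
    · subst hc
      cases h : splitRun rest with
      | mk n r =>
        rw [h] at ih
        simp only [reduceIte]
        exact ⟨by simpa [List.replicate_succ] using ih.1, ih.2⟩
    · simp [hc]

theorem onesB_ge (cs : List Char) : ∀ (i : Int), ∀ q ∈ onesB cs i, i ≤ q := by
  induction cs with
  | nil => simp [onesB]
  | cons c rest ih =>
    intro i q hq
    simp only [onesB] at hq
    split at hq
    · rcases List.mem_cons.mp hq with rfl | hq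
      · omega
      · have := ih (i + 1) q hq; omega
    · have := ih (i + 1) q hq; omega

theorem onesB_replicate (n : Nat) : ∀ (r : List Char) (j : Int),
    onesB (List.replicate n '1' ++ r) j = runFrom j n ++ onesB r (j + n) := by
  induction n with
  | zero => intro r j; simp [runFrom]
  | succ n ih =>
    intro r j
    simp only [List.replicate_succ, List.cons_append, onesB, reduceIte, runFrom, ih]
    have : j + 1 + (n : Int) = j + ((n + 1 : Nat) : Int) := by push_cast; ring
    rw [this]

theorem startsAux_run (n : Nat) : ∀ (prev : Int) (tail : List Int),
    startsAux prev (runFrom (prev + 1) n ++ tail) = startsAux (prev + n) tail := by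
  induction n with
  | zero => intro prev tail; simp [runFrom]
  | succ n ih =>
    intro prev tail
    simp only [runFrom, List.cons_append, startsAux]
    rw [if_neg (by omega)]
    have := ih (prev + 1) tail
    have harith : prev + 1 + (n : Int) = prev + ((n + 1 : Nat) : Int) := by push_cast; ring
    rw [harith] at this
    exact this

theorem endsB_run (n : Nat) : ∀ (p : Int) (tail : List Int),
    (∀ q ∈ tail.head?, p + n + 1 < q) →
    endsB (p :: (runFrom (p + 1) n ++ tail)) = (p + n + 1) :: endsB tail := by
  induction n with
  | zero =>
    intro p tail htail
    cases tail with
    | nil => simp [runFrom, endsB]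
    | cons q t =>
      have : q ≠ p + 1 := by have := htail q (by simp); omega
      simp [runFrom, endsB, this]
  | succ n ih =>
    intro p tail htail
    simp only [runFrom, List.cons_append, endsB]
    rw [if_neg (by omega)]
    have := ih (p + 1) tail (by intro q hq; have := htail q hq; push_cast at *; omega)
    rw [this]
    have : p + 1 + (n : Int) + 1 = p + ((n + 1 : Nat) : Int) + 1 := by push_cast; ring
    rw [this]

theorem startsAux_head (prev : Int) (l : List Int) (h : ∀ q ∈ l.head?, prev ≠ q - 1) :
    startsAux prev l = startsB l := by
  cases l with
  | nil => simp [startsAux, startsB]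
  | cons q t =>
    have : prev ≠ q - 1 := h q (by simp)
    simp [startsAux, startsB, this]

theorem startsB_cons (p : Int) (l : List Int) : startsB (p :: l) = p :: startsAux p l := rfl

theorem zip_eq_bRuns_aux (N : Nat) : ∀ (cs : List Char), cs.length ≤ N → ∀ (i : Int),
    List.zip (startsB (onesB cs i)) (endsB (onesB cs i)) = bRuns cs i := by
  induction N with
  | zero =>
    intro cs hcs i
    have : cs = [] := List.eq_nil_of_length_eq_zero (Nat.le_zero.mp hcs)
    subst this
    simp [onesB, startsB, endsB, bRuns]
  | succ M ih =>
    intro cs hcs i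
    cases cs with
    | nil => simp [onesB, startsB, endsB, bRuns]
    | cons c rest =>
      by_cases hc : c = '1'
      · subst hc
        obtain ⟨hdec, hhead⟩ := splitRun_decomp rest
        cases hsr : splitRun rest with
        | mk n r =>
          rw [hsr] at hdec hhead
          simp only at hdec hhead
          have htail : ∀ q ∈ (onesB r (i + 1 + (n : Int))).head?, i + (n : Int) + 1 < q := by
            intro q hq
            have hmem : q ∈ onesB r (i + 1 + (n : Int)) := List.mem_of_mem_head? hq
            cases hrr : r with
            | nil => rw [hrr] at hmem; simp [onesB] at hmem
            | cons d r' =>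
              have hd : d ≠ '1' := by rw [hrr] at hhead; exact hhead d (by simp)
              rw [hrr] at hmem
              simp only [onesB, if_neg hd] at hmem
              have := onesB_ge r' (i + 1 + (n : Int) + 1) q hmem
              omega
          have hones : onesB ('1' :: rest) i
              = i :: (runFrom (i + 1) n ++ onesB r (i + 1 + (n : Int))) := by
            rw [hdec]
            simp only [onesB, reduceIte, onesB_replicate]
          have hstarts : startsB (i :: (runFrom (i + 1) n ++ onesB r (i + 1 + (n : Int))))
              = i :: startsB (onesB r (i + 1 + (n : Int))) := by
            rw [startsB_cons, startsAux_run n i (onesB r (i + 1 + (n : Int))),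
              startsAux_head (i + (n : Int)) _ (fun q hq => by have := htail q hq; omega)]
          rw [hones, hstarts, endsB_run n i _ htail, List.zip_cons_cons]
          have hrlen : r.length ≤ M := by
            have h1 := splitRun_len_le rest
            rw [hsr] at h1
            simp only [List.length_cons] at hcs
            simp only at h1
            omega
          rw [ih r hrlen (i + 1 + (n : Int))]
          simp only [bRuns, reduceIte, hsr]
          have harith : i + (n : Int) + 1 = i + 1 + (n : Int) := by ring
          rw [harith]
      · have hones : onesB (c :: rest) i = onesB rest (i + 1) := by
          simp [onesB, hc]
        rw [hones, bRuns, if_neg hc]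
        exact ih rest (by simp at hcs; omega) (i + 1)

theorem zip_eq_bRuns (cs : List Char) (i : Int) :
    List.zip (startsB (onesB cs i)) (endsB (onesB cs i)) = bRuns cs i :=
  zip_eq_bRuns_aux cs.length cs le_rfl i

-- ===== VERDICT (by name: the statement is the Claim_ definition above) =====
theorem get_ranges_from_bitmask_spec : Claim_equal_get_ranges_from_bitmask := by
  intro bitmask _
  unfold Spec_get_ranges_from_bitmask get_ranges_from_bitmask get_ranges_from_bitmask_alt
  rw [zip_eq_bRuns]
  obtain ⟨p, q, heq, hp, hq⟩ := bitmask_split bitmask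
  rw [heq]
  exact a_eq_bRuns p q hp hq
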